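-- pv_equiv track=rewrite | github.com/neoneye/PlanExe | planexe/utils/enumerate_duplicate_strings.py | enumerate_duplicate_strings
-- ===== SOURCE A (Python) =====
-- def enumerate_duplicate_strings(input: dict[str, str]) -> dict[str, str]:
--     """
--     Enumerate duplicate string values in a dictionary by appending (1), (2), (3), etc.
--
--     Duplicate detection is case-insensitive while preserving the original
--     casing in the returned values. Numbering is per case-insensitive group
--     in the order the items appear in the input mapping.
--
--     Args:
--         input: Dictionary with string keys and string values
--
--     Returns:
--         Dictionary with the same keys but duplicate values are numbered
--
--     Examples:
--         Basic duplicates: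
--             >>> input = {'a': 'duplicate', 'b': 'duplicate', 'c': 'unique'}
--             >>> enumerate_duplicate_strings(input)
--             {'a': 'duplicate (1)', 'b': 'duplicate (2)', 'c': 'unique'}
--
--         Case-insensitive duplicates (original casing preserved):
--             >>> input = {'a': 'duplicate x', 'b': 'duplicate X'}
--             >>> enumerate_duplicate_strings(input)
--             {'a': 'duplicate x (1)', 'b': 'duplicate X (2)'}
--     """
--     if not isinstance(input, dict):
--         raise ValueError("Input must be a dictionary")
--
--     result: dict[str, str] = {}
--     value_counts: dict[str, int] = {}
--
--     # First pass: count occurrences using case-insensitive keys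
--     for _, value in input.items():
--         normalized = value.casefold()
--         value_counts[normalized] = value_counts.get(normalized, 0) + 1
--
--     # Second pass: build result with numbering per normalized value
--     value_used_counts: dict[str, int] = {}
--     for key, value in input.items():
--         normalized = value.casefold()
--         count_for_value = value_counts.get(normalized, 0)
--         if count_for_value > 1:
--             value_used_counts[normalized] = value_used_counts.get(normalized, 0) + 1
--             occurrence_index = value_used_counts[normalized]
--             result[key] = f"{value} ({occurrence_index})"
--         else:
--             result[key] = value
--
--     return result
-- ===== SOURCE B (Python) =====
-- def enumerate_duplicate_strings(input: dict[str, str]) -> dict[str, str]: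
--     if not isinstance(input, dict):
--         raise ValueError("Input must be a dictionary")
--
--     # Group the items by case-insensitive value, in appearance order.
--     groups: dict[str, list[tuple[str, str]]] = {}
--     for key, value in input.items():
--         groups.setdefault(value.casefold(), []).append((key, value))
--
--     # Per group: a singleton keeps its value, a larger group gets " (i)" suffixes.
--     mapping: dict[str, str] = {}
--     for kvs in groups.values():
--         if len(kvs) == 1:
--             k, v = kvs[0]
--             mapping[k] = v
--         else:
--             for i, (k, v) in enumerate(kvs, 1):
--                 mapping[k] = f"{v} ({i})"
--
--     # Assemble in the original key order.
--     return {key: mapping.get(key, value) for key, value in input.items()}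
-- ===== Notes on version B (the rewrite author's own statement) =====
-- stated objective: alternative
-- what changed: Replaces A's count-then-renumber double pass with running used-counters by a group-by-casefolded-value pass whose group lists directly yield each item's group size and 1-based position, then reassembles in original key order; Pre_ only excludes association lists with duplicate keys, which do not represent any Python dict.
import Mathlib
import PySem

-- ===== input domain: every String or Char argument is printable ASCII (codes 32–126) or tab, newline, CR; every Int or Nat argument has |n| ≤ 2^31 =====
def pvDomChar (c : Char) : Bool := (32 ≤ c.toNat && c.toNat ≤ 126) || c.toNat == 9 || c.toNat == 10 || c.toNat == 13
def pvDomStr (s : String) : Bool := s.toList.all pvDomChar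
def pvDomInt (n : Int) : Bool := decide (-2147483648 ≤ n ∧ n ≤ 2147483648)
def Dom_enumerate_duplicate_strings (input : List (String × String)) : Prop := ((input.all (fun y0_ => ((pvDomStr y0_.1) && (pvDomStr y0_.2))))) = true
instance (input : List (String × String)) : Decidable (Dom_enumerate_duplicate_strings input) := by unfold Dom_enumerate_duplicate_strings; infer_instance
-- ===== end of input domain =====

-- B groups items by case-insensitive value in one pass and numbers each group by position,
-- instead of A's count-then-renumber passes with running used-counters; return value only.


-- ===== PORT A =====
-- value.casefold() is ported as PySem.Str.lower: exact on the ASCII domain Dom_ admits.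
def enumerate_duplicate_strings (input : List (String × String)) : List (String × String) :=
  -- first pass: count occurrences using case-insensitive keys
  let value_counts : PySem.Dict String Int :=
    input.foldl (fun d kv => d.modify (PySem.Str.lower kv.2) 0 (· + 1)) PySem.Dict.empty
  -- second pass: build result with numbering per normalized value
  let st :=
    input.foldl
      (fun (st : PySem.Dict String String × PySem.Dict String Int) kv =>
        let normalized := PySem.Str.lower kv.2
        if 1 < value_counts.getD normalized 0 then
          let used := st.2.modify normalized 0 (· + 1)
          (st.1.insert kv.1 (kv.2 ++ " (" ++ PySem.Int.toStr (used.getD normalized 0) ++ ")"),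
           used)
        else
          (st.1.insert kv.1 kv.2, st.2))
      (PySem.Dict.empty, PySem.Dict.empty)
  st.1.items

-- ===== PORT B =====
def enumerate_duplicate_strings_alt (input : List (String × String)) : List (String × String) :=
  -- group the items by case-insensitive value, in appearance order
  let groups : PySem.Dict String (List (String × String)) :=
    input.foldl (fun d kv => d.modify (PySem.Str.lower kv.2) [] (· ++ [kv])) PySem.Dict.empty
  -- per group: a singleton keeps its value, a larger group gets " (i)" suffixes
  let mapping : PySem.Dict String String :=
    groups.items.foldl
      (fun m p =>
        if p.2.length == 1 then
          match p.2 with            -- k, v = kvs[0]  (a group is never empty)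
          | kv :: _ => m.insert kv.1 kv.2
          | [] => m
        else
          (PySem.List.enumerate p.2 1).foldl
            (fun m q => m.insert q.2.1 (q.2.2 ++ " (" ++ PySem.Int.toStr q.1 ++ ")")) m)
      PySem.Dict.empty
  -- assemble in the original key order
  input.map (fun kv => (kv.1, (mapping.get? kv.1).getD kv.2))

-- ===== PRECONDITION & SPEC =====
-- Pre_ excludes association lists with duplicate keys: they do not arise from a Python dict
-- (the dict collapses them), so neither side's value on them represents the Python function.
def Pre_enumerate_duplicate_strings (input : List (String × String)) : Prop :=
  (input.map Prod.fst).Nodup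
instance (input : List (String × String)) : Decidable (Pre_enumerate_duplicate_strings input) := by
  unfold Pre_enumerate_duplicate_strings; infer_instance

def pvWitness_enumerate_duplicate_strings : (List (String × String)) :=
  [("a", "Dup x"), ("b", "dup X"), ("c", "unique")]

def Spec_enumerate_duplicate_strings (input : List (String × String)) (out : List (String × String)) : Prop := out = enumerate_duplicate_strings_alt input
instance (input : List (String × String)) (out : List (String × String)) : Decidable (Spec_enumerate_duplicate_strings input out) := by unfold Spec_enumerate_duplicate_strings; infer_instance

-- ===== CLAIM (what is proved, stated in full; the proofs are below) =====
def Claim_equal_enumerate_duplicate_strings : Prop := ∀ (input : List (String × String)), Dom_enumerate_duplicate_strings input → Pre_enumerate_duplicate_strings input → Spec_enumerate_duplicate_strings input (enumerate_duplicate_strings input)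

-- ===== LEMMAS AND PROOFS =====

-- The common characterisation of both outputs: the value emitted for a pair (k, v) whose
-- case-insensitive group (within `all`, the normalized values of the whole input) has more
-- than one member is "v (j)", j counting occurrences of the group among `seen` (the
-- normalized values preceding the pair) plus one.
def outVal (all seen : List String) (v : String) : String :=
  if 1 < all.count (PySem.Str.lower v) then
    v ++ " (" ++ PySem.Int.toStr ((seen.count (PySem.Str.lower v) + 1 : Nat) : Int) ++ ")"
  else v

def specGo (all seen : List String) : List (String × String) → List (String × String)
  | [] => []
  | kv :: rest => (kv.1, outVal all seen kv.2) :: specGo all (seen ++ [PySem.Str.lower kv.2]) rest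

-- A's second-pass loop body, abstracted over the first-pass counts dict
def bodyA (vc : PySem.Dict String Int)
    (st : PySem.Dict String String × PySem.Dict String Int) (kv : String × String) :
    PySem.Dict String String × PySem.Dict String Int :=
  let normalized := PySem.Str.lower kv.2
  if 1 < vc.getD normalized 0 then
    let used := st.2.modify normalized 0 (· + 1)
    (st.1.insert kv.1 (kv.2 ++ " (" ++ PySem.Int.toStr (used.getD normalized 0) ++ ")"), used)
  else
    (st.1.insert kv.1 kv.2, st.2)

theorem countsA_getD (input : List (String × String)) (n : String) :
    (input.foldl (fun d kv => d.modify (PySem.Str.lower kv.2) 0 (· + 1))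
        PySem.Dict.empty).getD n 0
      = ((input.map (fun kv => PySem.Str.lower kv.2)).count n : Int) := by
  have h2 : (input.foldl (fun d kv => d.modify (PySem.Str.lower kv.2) 0 (· + 1))
        (PySem.Dict.empty : PySem.Dict String Int))
      = ((input.map (fun kv => PySem.Str.lower kv.2)).foldl
          (fun d x => d.modify x 0 (· + 1)) (PySem.Dict.empty : PySem.Dict String Int)) :=
    (List.foldl_map (f := fun kv : String × String => PySem.Str.lower kv.2)
      (g := fun (d : PySem.Dict String Int) x => d.modify x 0 (· + 1))).symm
  have h3 : ((input.map (fun kv => PySem.Str.lower kv.2)).foldl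
        (fun d x => d.modify x 0 (· + 1)) (PySem.Dict.empty : PySem.Dict String Int)).getD n 0
      = ((input.map (fun kv => PySem.Str.lower kv.2)).count n : Int) := by
    rw [PySem.Dict.getD_foldl_modify_add_one, PySem.Dict.getD_empty]
    simp
  exact (congrArg (fun d => PySem.Dict.getD d n 0) h2).trans h3

theorem loopA (all : List String) (vc : PySem.Dict String Int)
    (hvc : ∀ n, vc.getD n 0 = (all.count n : Int)) :
    ∀ (rest : List (String × String)) (seen : List String) (res : PySem.Dict String String),
      (res.keys ++ rest.map Prod.fst).Nodup →
      (rest.foldl (bodyA vc)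
          (res, PySem.Dict.counter (seen.filter (fun n => decide (1 < all.count n))))).1.items
        = res.items ++ specGo all seen rest := by
  intro rest
  induction rest with
  | nil => intro seen res _; simp [specGo]
  | cons kv rest ih =>
    intro seen res hnd
    have hkey : kv.1 ∉ res.keys := by
      rw [List.map_cons, List.nodup_append] at hnd
      intro hmem
      exact hnd.2.2 kv.1 hmem kv.1 (List.mem_cons_self ..) rfl
    have hcont : res.contains kv.1 = false := by
      rw [← Bool.not_eq_true]
      exact fun h => hkey ((PySem.Dict.contains_iff_mem_keys res kv.1).mp h)
    have hnd' : ∀ (w : String), ((res.insert kv.1 w).keys ++ rest.map Prod.fst).Nodup := by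
      intro w
      rw [PySem.Dict.keys_insert_of_not_contains res w hcont, List.append_assoc,
        List.singleton_append]
      simpa using hnd
    set n := PySem.Str.lower kv.2 with hn
    rw [List.foldl_cons]
    by_cases hc : 1 < all.count n
    · have hcond : (1 : Int) < vc.getD n 0 := by rw [hvc]; exact_mod_cast hc
      have hfilter : (seen ++ [n]).filter (fun n => decide (1 < all.count n))
          = seen.filter (fun n => decide (1 < all.count n)) ++ [n] := by
        rw [List.filter_append]; simp [hc]
      have hused : (PySem.Dict.counter
            (seen.filter (fun n => decide (1 < all.count n)))).modify n 0 (· + 1)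
          = PySem.Dict.counter ((seen ++ [n]).filter (fun n => decide (1 < all.count n))) := by
        rw [hfilter, PySem.Dict.counter_append_singleton]
      have hgetD : (PySem.Dict.counter
            ((seen ++ [n]).filter (fun n => decide (1 < all.count n)))).getD n 0
          = ((seen.count n + 1 : Nat) : Int) := by
        rw [PySem.Dict.getD_counter, hfilter, List.count_append,
          List.count_filter (by simpa using hc)]
        simp
      have hbody : bodyA vc
            (res, PySem.Dict.counter (seen.filter (fun n => decide (1 < all.count n)))) kv
          = (res.insert kv.1 (outVal all seen kv.2),
             PySem.Dict.counter ((seen ++ [n]).filter (fun n => decide (1 < all.count n)))) := by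
        show (if 1 < vc.getD n 0 then _ else _) = _
        rw [if_pos hcond, hused, hgetD]
        unfold outVal
        rw [← hn, if_pos hc]
      rw [hbody, ih (seen ++ [n]) _ (hnd' _),
        PySem.Dict.items_insert_of_not_contains res _ hcont]
      simp [specGo, ← hn]
    · have hcond : ¬ (1 : Int) < vc.getD n 0 := by rw [hvc]; exact_mod_cast hc
      have hfilter : (seen ++ [n]).filter (fun n => decide (1 < all.count n))
          = seen.filter (fun n => decide (1 < all.count n)) := by
        rw [List.filter_append]; simp [hc]
      have hbody : bodyA vc
            (res, PySem.Dict.counter (seen.filter (fun n => decide (1 < all.count n)))) kv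
          = (res.insert kv.1 (outVal all seen kv.2),
             PySem.Dict.counter ((seen ++ [n]).filter (fun n => decide (1 < all.count n)))) := by
        show (if 1 < vc.getD n 0 then _ else _) = _
        rw [if_neg hcond, hfilter]
        unfold outVal
        rw [← hn, if_neg hc]
      rw [hbody, ih (seen ++ [n]) _ (hnd' _),
        PySem.Dict.items_insert_of_not_contains res _ hcont]
      simp [specGo, ← hn]

theorem a_eq_spec (input : List (String × String))
    (hk : (input.map Prod.fst).Nodup) :
    enumerate_duplicate_strings input
      = specGo (input.map (fun kv => PySem.Str.lower kv.2)) [] input := by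
  have h := loopA _ _ (countsA_getD input) input [] PySem.Dict.empty
    (by rw [PySem.Dict.keys_empty, List.nil_append]; exact hk)
  rw [List.filter_nil] at h
  rw [show (PySem.Dict.empty : PySem.Dict String String).items = [] from rfl,
    List.nil_append] at h
  exact h

-- B-side proof helpers: B's grouping fold, mapping fold, and the pairs one group contributes
def Bgroups (input : List (String × String)) : PySem.Dict String (List (String × String)) :=
  input.foldl (fun d kv => d.modify (PySem.Str.lower kv.2) [] (· ++ [kv])) PySem.Dict.empty

def stepB (m : PySem.Dict String String) (p : String × List (String × String)) :
    PySem.Dict String String :=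
  if p.2.length == 1 then
    match p.2 with
    | kv :: _ => m.insert kv.1 kv.2
    | [] => m
  else
    (PySem.List.enumerate p.2 1).foldl
      (fun m q => m.insert q.2.1 (q.2.2 ++ " (" ++ PySem.Int.toStr q.1 ++ ")")) m

def Bmapping (input : List (String × String)) : PySem.Dict String String :=
  (Bgroups input).items.foldl stepB PySem.Dict.empty

def entriesB (kvs : List (String × String)) : List (String × String) :=
  if kvs.length == 1 then
    match kvs with
    | kv :: _ => [(kv.1, kv.2)]
    | [] => []
  else
    (PySem.List.enumerate kvs 1).map
      (fun q => (q.2.1, q.2.2 ++ " (" ++ PySem.Int.toStr q.1 ++ ")"))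

theorem alt_def (input : List (String × String)) :
    enumerate_duplicate_strings_alt input
      = input.map (fun kv => (kv.1, ((Bmapping input).get? kv.1).getD kv.2)) := rfl

theorem entriesB_keys (kvs : List (String × String)) :
    (entriesB kvs).map Prod.fst = kvs.map Prod.fst := by
  unfold entriesB
  split
  · next h =>
    cases kvs with
    | nil => simp
    | cons kv tl =>
      have htl : tl = [] :=
        List.eq_nil_iff_length_eq_zero.mpr (by simpa using h)
      subst htl; simp
  · rw [List.map_map,
      show (Prod.fst ∘ fun q : Int × (String × String) =>
          (q.2.1, q.2.2 ++ " (" ++ PySem.Int.toStr q.1 ++ ")"))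
        = (Prod.fst ∘ Prod.snd) from rfl,
      ← List.map_map, PySem.List.map_snd_enumerate]

theorem stepB_items (m : PySem.Dict String String) (p : String × List (String × String))
    (hfresh : ∀ k ∈ p.2.map Prod.fst, k ∉ m.keys) (hnd : (p.2.map Prod.fst).Nodup) :
    (stepB m p).items = m.items ++ entriesB p.2 := by
  unfold stepB entriesB
  split
  · cases hp : p.2 with
    | nil => simp
    | cons kv tl =>
      have hc : m.contains kv.1 = false := by
        rw [← Bool.not_eq_true]
        exact fun hh => hfresh kv.1 (by simp [hp])
          ((PySem.Dict.contains_iff_mem_keys _ _).mp hh)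
      exact PySem.Dict.items_insert_of_not_contains m kv.2 hc
  · have h := PySem.Dict.items_foldl_insert_fresh
      (l := PySem.List.enumerate p.2 1)
      (k := fun q => q.2.1)
      (v := fun q => q.2.2 ++ " (" ++ PySem.Int.toStr q.1 ++ ")")
      (d := m)
      (by
        intro a ha
        have hmem : a.2.1 ∈ p.2.map Prod.fst := by
          refine List.mem_map_of_mem ?_
          rw [← PySem.List.map_snd_enumerate p.2 1]
          exact List.mem_map_of_mem ha
        rw [← Bool.not_eq_true]
        exact fun hh => hfresh a.2.1 hmem ((PySem.Dict.contains_iff_mem_keys _ _).mp hh))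
      (by
        rw [show (fun q : Int × (String × String) => q.2.1) = (Prod.fst ∘ Prod.snd) from rfl,
          ← List.map_map, PySem.List.map_snd_enumerate]
        exact hnd)
    exact h

theorem loopB : ∀ (gs : List (String × List (String × String))) (m : PySem.Dict String String),
    (m.keys ++ gs.flatMap (fun p => p.2.map Prod.fst)).Nodup →
    (gs.foldl stepB m).items = m.items ++ gs.flatMap (fun p => entriesB p.2) := by
  intro gs
  induction gs with
  | nil => intro m _; simp
  | cons p gs ih =>
    intro m hnd
    rw [List.flatMap_cons, ← List.append_assoc] at hnd
    have hnd1 := (List.nodup_append.mp hnd).1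
    have hfresh : ∀ k ∈ p.2.map Prod.fst, k ∉ m.keys := by
      intro k hk hmk
      have h2 := (List.nodup_append.mp hnd1).2.2
      exact h2 k hmk k hk rfl
    have hndp : (p.2.map Prod.fst).Nodup := (List.nodup_append.mp hnd1).2.1
    have hkeys : (stepB m p).keys = m.keys ++ p.2.map Prod.fst := by
      show (stepB m p).items.map (·.1) = _
      rw [stepB_items m p hfresh hndp, List.map_append]
      have h1 : (m.items.map fun x => x.1) = m.keys := rfl
      have h2 : (entriesB p.2).map (fun x => x.1) = p.2.map Prod.fst := entriesB_keys p.2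
      rw [h1, h2]
    rw [List.foldl_cons,
      ih (stepB m p) (by rw [hkeys]; exact hnd),
      stepB_items m p hfresh hndp, List.flatMap_cons, List.append_assoc]

theorem groups_getD (input : List (String × String)) (n : String) :
    (Bgroups input).getD n []
      = input.filter (fun kv => PySem.Str.lower kv.2 == n) := by
  unfold Bgroups
  have h2 : (input.foldl (fun d kv => d.modify (PySem.Str.lower kv.2) [] (· ++ [kv]))
        (PySem.Dict.empty : PySem.Dict String (List (String × String))))
      = ((input.map (fun kv => (PySem.Str.lower kv.2, kv))).foldl
          (fun d p => d.modify p.1 [] (· ++ [p.2]))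
          (PySem.Dict.empty : PySem.Dict String (List (String × String)))) :=
    (List.foldl_map (f := fun kv : String × String => (PySem.Str.lower kv.2, kv))
      (g := fun (d : PySem.Dict String (List (String × String))) p =>
        d.modify p.1 [] (· ++ [p.2]))).symm
  have h3 := PySem.Dict.getD_foldl_modify_append
    (input.map (fun kv => (PySem.Str.lower kv.2, kv)))
    (PySem.Dict.empty : PySem.Dict String (List (String × String))) n
  rw [PySem.Dict.getD_empty, List.nil_append, List.filter_map, List.map_map] at h3
  exact (congrArg (fun d => PySem.Dict.getD d n []) h2).trans (h3.trans (by
    rw [show ((fun x : String × (String × String) => x.2)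
        ∘ fun kv : String × String => (PySem.Str.lower kv.2, kv)) = id from rfl,
      List.map_id]
    rfl))

theorem groups_keys (input : List (String × String)) :
    (Bgroups input).keys
      = PySem.Set.ofList (input.map (fun kv => PySem.Str.lower kv.2)) := by
  have h := PySem.Dict.keys_foldl_modify_key
    (l := input) (key := fun kv : String × String => PySem.Str.lower kv.2)
    (d0 := ([] : List (String × String)))
    (f := fun _ kv => (· ++ [kv]))
    (d := PySem.Dict.empty)
  rw [PySem.Dict.keys_empty, PySem.Set.update_nil_left] at h
  exact h

theorem groups_items (input : List (String × String)) :
    (Bgroups input).items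
      = (PySem.Set.ofList (input.map (fun kv => PySem.Str.lower kv.2))).map
          (fun n => (n, input.filter (fun kv => PySem.Str.lower kv.2 == n))) := by
  have hnd : (Bgroups input).keys.Nodup := by
    rw [groups_keys]; exact PySem.Set.nodup_ofList _
  rw [PySem.Dict.items_eq_map_keys (Bgroups input) hnd [], groups_keys]
  exact List.map_congr_left (fun n _ => by rw [groups_getD])

theorem countP_norm (l : List (String × String)) (n : String) :
    (l.map (fun kv => PySem.Str.lower kv.2)).count n
      = (l.filter (fun kv => PySem.Str.lower kv.2 == n)).length := by
  rw [List.count_eq_countP, List.countP_map,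
    show ((fun x => x == n) ∘ fun kv : String × String => PySem.Str.lower kv.2)
      = fun kv : String × String => PySem.Str.lower kv.2 == n from rfl,
    List.countP_eq_length_filter]

theorem keysFlat_nodup (input : List (String × String))
    (hk : (input.map Prod.fst).Nodup) :
    ((PySem.Set.ofList (input.map (fun kv => PySem.Str.lower kv.2))).flatMap
        (fun n => (input.filter (fun kv => PySem.Str.lower kv.2 == n)).map Prod.fst)).Nodup := by
  rw [List.nodup_flatMap]
  constructor
  · intro n _
    exact hk.sublist (List.Sublist.map Prod.fst List.filter_sublist)
  · have hset : (PySem.Set.ofList (input.map (fun kv => PySem.Str.lower kv.2))).Nodup :=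
      PySem.Set.nodup_ofList _
    refine hset.imp ?_
    intro n n' hne k hk1 hk2
    obtain ⟨kv1, hkv1, hf1⟩ := List.mem_map.mp hk1
    obtain ⟨kv2, hkv2, hf2⟩ := List.mem_map.mp hk2
    rw [List.mem_filter] at hkv1 hkv2
    have heq : kv1 = kv2 :=
      List.inj_on_of_nodup_map hk hkv1.1 hkv2.1 (hf1.trans hf2.symm)
    apply hne
    have e1 := eq_of_beq hkv1.2
    have e2 := eq_of_beq hkv2.2
    rw [← e1, ← e2, heq]

theorem mapping_items (input : List (String × String))
    (hk : (input.map Prod.fst).Nodup) :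
    (Bmapping input).items
      = (PySem.Set.ofList (input.map (fun kv => PySem.Str.lower kv.2))).flatMap
          (fun n => entriesB (input.filter (fun kv => PySem.Str.lower kv.2 == n))) := by
  unfold Bmapping
  rw [groups_items, loopB _ PySem.Dict.empty (by
    rw [PySem.Dict.keys_empty, List.nil_append, List.flatMap_map]
    exact keysFlat_nodup input hk)]
  rw [List.flatMap_map]
  rfl

theorem mapping_keys_nodup (input : List (String × String))
    (hk : (input.map Prod.fst).Nodup) :
    (Bmapping input).keys.Nodup := by
  show ((Bmapping input).items.map (·.1)).Nodup
  rw [mapping_items input hk, List.map_flatMap]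
  simp only [entriesB_keys]
  exact keysFlat_nodup input hk

theorem mapping_get (input : List (String × String))
    (hk : (input.map Prod.fst).Nodup)
    (pre suf : List (String × String)) (kv : String × String)
    (hsplit : input = pre ++ kv :: suf) :
    (Bmapping input).get? kv.1
      = some (outVal (input.map (fun kv => PySem.Str.lower kv.2))
          (pre.map (fun kv => PySem.Str.lower kv.2)) kv.2) := by
  have hmemkv : kv ∈ input := by rw [hsplit]; simp
  have hnall : PySem.Str.lower kv.2 ∈ input.map (fun kv => PySem.Str.lower kv.2) :=
    List.mem_map_of_mem hmemkv
  have hFsplit : input.filter (fun kv' => PySem.Str.lower kv'.2 == PySem.Str.lower kv.2)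
      = pre.filter (fun kv' => PySem.Str.lower kv'.2 == PySem.Str.lower kv.2)
        ++ kv :: suf.filter (fun kv' => PySem.Str.lower kv'.2 == PySem.Str.lower kv.2) := by
    rw [hsplit, List.filter_append, List.filter_cons_of_pos (by simp)]
  have hlen := countP_norm input (PySem.Str.lower kv.2)
  have hprelen := countP_norm pre (PySem.Str.lower kv.2)
  have hpos : 0 < (input.filter
      (fun kv' => PySem.Str.lower kv'.2 == PySem.Str.lower kv.2)).length := by
    rw [hFsplit]; simp
  have hsetmem : PySem.Str.lower kv.2
      ∈ PySem.Set.ofList (input.map (fun kv => PySem.Str.lower kv.2)) :=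
    (PySem.Set.mem_ofList _ _).mpr hnall
  by_cases hc : 1 < (input.map (fun kv => PySem.Str.lower kv.2)).count (PySem.Str.lower kv.2)
  · -- a real duplicate group: the entry carries a numbered value
    have hne1 : ((input.filter
        (fun kv' => PySem.Str.lower kv'.2 == PySem.Str.lower kv.2)).length == 1) = false := by
      rw [hlen] at hc
      simp only [beq_eq_false_iff_ne]
      omega
    have hel : ((1 + ((pre.filter
          (fun kv' => PySem.Str.lower kv'.2 == PySem.Str.lower kv.2)).length : Int)), kv)
        ∈ PySem.List.enumerate (input.filter
            (fun kv' => PySem.Str.lower kv'.2 == PySem.Str.lower kv.2)) 1 := by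
      rw [hFsplit, PySem.List.enumerate_append, PySem.List.enumerate_cons]
      exact List.mem_append_right _ (List.mem_cons_self ..)
    have hentry : (kv.1, kv.2 ++ " (" ++ PySem.Int.toStr
          (1 + ((pre.filter
            (fun kv' => PySem.Str.lower kv'.2 == PySem.Str.lower kv.2)).length : Int)) ++ ")")
        ∈ entriesB (input.filter
            (fun kv' => PySem.Str.lower kv'.2 == PySem.Str.lower kv.2)) := by
      unfold entriesB
      rw [if_neg (by rw [hne1]; exact Bool.false_ne_true)]
      exact List.mem_map_of_mem hel
    have hval : kv.2 ++ " (" ++ PySem.Int.toStr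
          (1 + ((pre.filter
            (fun kv' => PySem.Str.lower kv'.2 == PySem.Str.lower kv.2)).length : Int)) ++ ")"
        = outVal (input.map (fun kv => PySem.Str.lower kv.2))
            (pre.map (fun kv => PySem.Str.lower kv.2)) kv.2 := by
      unfold outVal
      rw [if_pos hc, hprelen]
      congr 2
      exact congrArg PySem.Int.toStr (by push_cast; omega)
    rw [← hval]
    refine PySem.Dict.get?_of_mem_items (Bmapping input) ?_ (mapping_keys_nodup input hk)
    rw [mapping_items input hk]
    exact List.mem_flatMap.mpr ⟨PySem.Str.lower kv.2, hsetmem, hentry⟩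
  · -- a singleton group: the value is kept unchanged
    have hF1 : input.filter (fun kv' => PySem.Str.lower kv'.2 == PySem.Str.lower kv.2)
        = [kv] := by
      rw [hlen] at hc
      rw [hFsplit]
      rw [hFsplit] at hc
      simp only [List.length_append, List.length_cons] at hc
      have h1 : (pre.filter
          (fun kv' => PySem.Str.lower kv'.2 == PySem.Str.lower kv.2)).length = 0 := by omega
      have h2 : (suf.filter
          (fun kv' => PySem.Str.lower kv'.2 == PySem.Str.lower kv.2)).length = 0 := by omega
      rw [List.eq_nil_iff_length_eq_zero.mpr h1, List.eq_nil_iff_length_eq_zero.mpr h2]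
      rfl
    have hentry : (kv.1, kv.2)
        ∈ entriesB (input.filter
            (fun kv' => PySem.Str.lower kv'.2 == PySem.Str.lower kv.2)) := by
      rw [hF1]
      show (kv.1, kv.2) ∈ [(kv.1, kv.2)]
      exact List.mem_singleton.mpr rfl
    have hval : kv.2 = outVal (input.map (fun kv => PySem.Str.lower kv.2))
        (pre.map (fun kv => PySem.Str.lower kv.2)) kv.2 := by
      unfold outVal
      rw [if_neg hc]
    rw [← hval]
    refine PySem.Dict.get?_of_mem_items (Bmapping input) ?_ (mapping_keys_nodup input hk)
    rw [mapping_items input hk]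
    exact List.mem_flatMap.mpr ⟨PySem.Str.lower kv.2, hsetmem, hentry⟩

theorem loopB_final (input : List (String × String))
    (hk : (input.map Prod.fst).Nodup) :
    ∀ (suf pre : List (String × String)), input = pre ++ suf →
      suf.map (fun kv => (kv.1, ((Bmapping input).get? kv.1).getD kv.2))
        = specGo (input.map (fun kv => PySem.Str.lower kv.2))
            (pre.map (fun kv => PySem.Str.lower kv.2)) suf := by
  intro suf
  induction suf with
  | nil => intro pre _; simp [specGo]
  | cons kv suf ih =>
    intro pre hsplit
    rw [List.map_cons]
    rw [mapping_get input hk pre suf kv hsplit]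
    have htail := ih (pre ++ [kv]) (by rw [hsplit, List.append_assoc]; rfl)
    rw [List.map_append] at htail
    rw [htail]
    simp [specGo]

theorem b_eq_spec (input : List (String × String))
    (hk : (input.map Prod.fst).Nodup) :
    enumerate_duplicate_strings_alt input
      = specGo (input.map (fun kv => PySem.Str.lower kv.2)) [] input := by
  rw [alt_def]
  have h := loopB_final input hk input [] rfl
  simpa using h

-- ===== VERDICT (by name: the statement is the Claim_ definition above) =====
theorem enumerate_duplicate_strings_spec : Claim_equal_enumerate_duplicate_strings := by
  intro input _ hpre
  unfold Spec_enumerate_duplicate_strings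
  rw [a_eq_spec input hpre, b_eq_spec input hpre]
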